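-- pv_equiv track=rewrite | github.com/Hallowaa/ocrjt | ocrjt.py | find_sentences_in_row
-- ===== SOURCE A (Python) =====
-- def find_sentences_in_row(row):
--     sentences = []
--     current_sentence = []
--
--     for segment in row:
--         if not current_sentence or abs(current_sentence[-1]['x'] + current_sentence[-1]['w'] - segment['x']) < 120:  # x threshold
--             current_sentence.append(segment)
--         else:
--             sentences.append(current_sentence)
--             current_sentence = [segment]
--
--     if current_sentence:
--         sentences.append(current_sentence)
--
--     return sentences
-- ===== SOURCE B (Python) =====
-- def find_sentences_in_row(row):
--     # Build the grouping back-to-front: walk the row in reverse and either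
--     # prepend the segment to the first (leftmost) sentence built so far, or
--     # open a new sentence in front of it.
--     sentences = []
--     for segment in reversed(row):
--         if sentences and abs(segment['x'] + segment['w'] - sentences[0][0]['x']) < 120:
--             sentences[0] = [segment] + sentences[0]
--         else:
--             sentences = [[segment]] + sentences
--     return sentences
-- ===== Notes on version B (the rewrite author's own statement) =====
-- stated objective: alternative
-- what changed: B builds the grouping back-to-front in one reversed pass (prepend the segment to the first sentence or open a new one), replacing A's forward loop with a separate current-sentence buffer and a trailing flush.
import Mathlib
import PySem

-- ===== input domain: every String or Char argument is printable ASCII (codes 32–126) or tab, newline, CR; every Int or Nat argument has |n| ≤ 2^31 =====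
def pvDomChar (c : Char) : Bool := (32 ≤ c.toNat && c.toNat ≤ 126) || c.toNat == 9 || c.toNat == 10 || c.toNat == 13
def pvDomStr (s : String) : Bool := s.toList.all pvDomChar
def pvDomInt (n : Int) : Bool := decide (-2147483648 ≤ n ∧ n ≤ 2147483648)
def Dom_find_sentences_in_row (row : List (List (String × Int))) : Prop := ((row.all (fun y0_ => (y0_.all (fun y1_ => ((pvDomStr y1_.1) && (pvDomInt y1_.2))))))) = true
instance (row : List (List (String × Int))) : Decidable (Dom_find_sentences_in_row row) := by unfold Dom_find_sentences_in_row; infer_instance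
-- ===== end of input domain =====

-- B rebuilds the grouping back-to-front with a single reversed pass (prepend to the
-- first sentence or open a new one), instead of A's forward flush-buffer loop; objective: alternative.

-- shared helper: Python's seg['k'] (first-match dict lookup); Python raises KeyError on a
-- missing key, here getD 0 — exact on Pre_, which requires every accessed key to be present.
def lookupD (seg : List (String × Int)) (k : String) : Int :=
  ((PySem.Dict.mk seg).get? k).getD 0

-- ===== PORT A =====
def find_sentences_in_row (row : List (List (String × Int))) : List (List (List (String × Int))) :=
  let st := row.foldl
    (fun (st : List (List (List (String × Int))) × List (List (String × Int))) segment =>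
      if st.2.isEmpty ||
          decide (|lookupD ((PySem.List.pyGet? st.2 (-1)).getD []) "x"
                   + lookupD ((PySem.List.pyGet? st.2 (-1)).getD []) "w"
                   - lookupD segment "x"| < 120) then
        (st.1, st.2 ++ [segment])
      else
        (st.1 ++ [st.2], [segment]))
    ([], [])
  if !st.2.isEmpty then st.1 ++ [st.2] else st.1

-- ===== PORT B =====
def find_sentences_in_row_alt (row : List (List (String × Int))) : List (List (List (String × Int))) :=
  row.foldr
    (fun segment sentences =>
      if !sentences.isEmpty &&
          decide (|lookupD segment "x" + lookupD segment "w"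
                   - lookupD ((sentences.headD []).headD []) "x"| < 120) then
        ([segment] ++ sentences.headD []) :: sentences.tail
      else
        [segment] :: sentences)
    []

-- ===== PRECONDITION & SPEC =====
-- Pre_ excludes exactly the inputs where Python A raises KeyError: every segment with a
-- right neighbour needs keys "x" and "w", every segment with a left neighbour needs key "x".
def Pre_find_sentences_in_row (row : List (List (String × Int))) : Prop :=
  ∀ p ∈ row.zip row.tail,
    ((PySem.Dict.mk p.1).get? "x").isSome ∧ ((PySem.Dict.mk p.1).get? "w").isSome ∧
    ((PySem.Dict.mk p.2).get? "x").isSome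
instance (row : List (List (String × Int))) : Decidable (Pre_find_sentences_in_row row) := by
  unfold Pre_find_sentences_in_row; infer_instance

def pvWitness_find_sentences_in_row : (List (List (String × Int))) :=
  [[("x", 0), ("w", 10)], [("x", 20), ("w", 5)], [("x", 300), ("w", 7)]]

def Spec_find_sentences_in_row (row : List (List (String × Int))) (out : List (List (List (String × Int)))) : Prop := out = find_sentences_in_row_alt row
instance (row : List (List (String × Int))) (out : List (List (List (String × Int)))) : Decidable (Spec_find_sentences_in_row row out) := by unfold Spec_find_sentences_in_row; infer_instance

-- ===== CLAIM (what is proved, stated in full; the proofs are below) =====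
def Claim_equal_find_sentences_in_row : Prop := ∀ (row : List (List (String × Int))), Dom_find_sentences_in_row row → Pre_find_sentences_in_row row → Spec_find_sentences_in_row row (find_sentences_in_row row)

-- ===== LEMMAS AND PROOFS =====

-- abbreviations for the two loop bodies and A's trailing flush, for the lemmas below
def stepA (st : List (List (List (String × Int))) × List (List (String × Int)))
    (segment : List (String × Int)) :
    List (List (List (String × Int))) × List (List (String × Int)) :=
  if st.2.isEmpty ||
      decide (|lookupD ((PySem.List.pyGet? st.2 (-1)).getD []) "x"
               + lookupD ((PySem.List.pyGet? st.2 (-1)).getD []) "w"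
               - lookupD segment "x"| < 120) then
    (st.1, st.2 ++ [segment])
  else
    (st.1 ++ [st.2], [segment])

def stepB (segment : List (String × Int)) (sentences : List (List (List (String × Int)))) :
    List (List (List (String × Int))) :=
  if !sentences.isEmpty &&
      decide (|lookupD segment "x" + lookupD segment "w"
               - lookupD ((sentences.headD []).headD []) "x"| < 120) then
    ([segment] ++ sentences.headD []) :: sentences.tail
  else
    [segment] :: sentences

def finishA (st : List (List (List (String × Int))) × List (List (String × Int))) :
    List (List (List (String × Int))) :=
  if !st.2.isEmpty then st.1 ++ [st.2] else st.1

-- prepend a prefix onto the first group (or make it the only group)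
def consFirst (pre : List (List (String × Int))) :
    List (List (List (String × Int))) → List (List (List (String × Int)))
  | [] => [pre]
  | g :: gs => (pre ++ g) :: gs

lemma portA_eq (row : List (List (String × Int))) :
    find_sentences_in_row row = finishA (row.foldl stepA ([], [])) := rfl

lemma alt_nil : find_sentences_in_row_alt [] = [] := rfl

lemma alt_cons (a : List (String × Int)) (xs : List (List (String × Int))) :
    find_sentences_in_row_alt (a :: xs) = stepB a (find_sentences_in_row_alt xs) := rfl

-- B on a nonempty list is nonempty and its first sentence starts with the first segment
lemma alt_cons_shape (a : List (String × Int)) (xs : List (List (String × Int))) :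
    ∃ t gs, find_sentences_in_row_alt (a :: xs) = (a :: t) :: gs := by
  rw [alt_cons]
  unfold stepB
  cases h : find_sentences_in_row_alt xs with
  | nil => exact ⟨[], [], by simp⟩
  | cons g gs =>
    by_cases hc : |lookupD a "x" + lookupD a "w" - lookupD (g.head?.getD []) "x"| < 120
    · exact ⟨g, gs, by simp [hc]⟩
    · exact ⟨[], g :: gs, by simp [hc]⟩

lemma loopA (row : List (List (String × Int))) :
    ∀ (sents : List (List (List (String × Int)))) (cur : List (List (String × Int)))
      (l : List (String × Int)),
      finishA (row.foldl stepA (sents, cur ++ [l]))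
        = sents ++ consFirst cur (find_sentences_in_row_alt (l :: row)) := by
  induction row with
  | nil =>
    intro sents cur l
    simp [finishA, alt_cons, alt_nil, stepB, consFirst]
  | cons seg rest ih =>
    intro sents cur l
    obtain ⟨t, gs, hshape⟩ := alt_cons_shape seg rest
    have hstep : stepA (sents, cur ++ [l]) seg =
        if decide (|lookupD l "x" + lookupD l "w" - lookupD seg "x"| < 120) then
          (sents, (cur ++ [l]) ++ [seg])
        else (sents ++ [cur ++ [l]], [seg]) := by
      unfold stepA
      simp [PySem.List.pyGet?_neg_one_append_singleton]
    rw [List.foldl_cons, hstep]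
    by_cases hc : |lookupD l "x" + lookupD l "w" - lookupD seg "x"| < 120
    · rw [if_pos (by simpa using hc), ih sents (cur ++ [l]) seg]
      rw [alt_cons l, hshape]
      unfold stepB
      have hhead : (((seg :: t) :: gs).headD []).headD [] = seg := by simp
      simp [hc, consFirst]
    · have hih := ih (sents ++ [cur ++ [l]]) [] seg
      simp only [List.nil_append] at hih
      rw [if_neg (by simpa using hc), hih]
      rw [alt_cons l, hshape]
      unfold stepB
      simp [hc, consFirst]

-- ===== VERDICT (by name: the statement is the Claim_ definition above) =====
theorem find_sentences_in_row_spec : Claim_equal_find_sentences_in_row := by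
  intro row _ _
  unfold Spec_find_sentences_in_row
  cases row with
  | nil => rfl
  | cons a rest =>
    rw [portA_eq, List.foldl_cons]
    have hfirst : stepA ([], []) a = ([], [] ++ [a]) := by simp [stepA]
    rw [hfirst, loopA rest [] [] a]
    obtain ⟨t, gs, hshape⟩ := alt_cons_shape a rest
    rw [hshape]
    simp [consFirst]
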